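-- pv_equiv track=rewrite | github.com/21eleven/ProjectOiler | p37/attempts/p37.py | makeParts
-- ===== SOURCE A (Python) =====
-- def makeParts(x):
--     x = str(x)
--     parts = [x]
--     for i in range(1,len(x)):
--         l, r = i, 0-i
--         l, r = x[l:], x[:r]
--         parts += [l] + [r]
--     return parts
-- ===== SOURCE B (Python) =====
-- def makeParts(x):
--     s = str(x)
--
--     def peel(left, right):
--         if len(left) <= 1:
--             return []
--         left, right = left[1:], right[:-1]
--         return [left, right] + peel(left, right)
--
--     return [s] + peel(s, s)
-- ===== Notes on version B (the rewrite author's own statement) =====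
-- stated objective: alternative
-- what changed: B replaces A's index loop slicing the original string (s[i:], s[:-i]) by a recursive helper that incrementally peels one character off the front of a running left string and off the back of a running right string per step, accumulating pairs until one character remains.
import Mathlib
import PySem

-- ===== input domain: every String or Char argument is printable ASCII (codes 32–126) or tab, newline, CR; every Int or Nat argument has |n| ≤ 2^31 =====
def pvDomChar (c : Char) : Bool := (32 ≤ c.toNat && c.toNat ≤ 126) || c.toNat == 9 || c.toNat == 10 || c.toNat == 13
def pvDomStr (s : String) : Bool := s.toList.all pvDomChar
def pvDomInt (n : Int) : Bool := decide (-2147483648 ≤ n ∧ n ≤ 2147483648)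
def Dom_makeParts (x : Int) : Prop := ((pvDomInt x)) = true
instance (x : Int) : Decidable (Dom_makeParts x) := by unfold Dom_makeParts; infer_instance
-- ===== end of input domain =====

-- B replaces A's index loop slicing the original string by a recursive helper that peels one
-- character per step off running left/right strings; alternative decomposition, same cost.

-- ===== PORT A =====
def makeParts (x : Int) : List String :=
  let s := PySem.Int.toStr x
  ((PySem.List.pyRange 1 (PySem.Str.len s) 1).foldl
    (fun parts i =>
      parts ++ ([PySem.Str.slice s (some i) none] ++ [PySem.Str.slice s none (some (0 - i))]))
    [s])

-- ===== PORT B =====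
-- peel(left, right): chop one char from the front of left and the back of right each step
-- (strings handled via their char lists; left[1:] = tail-slice, right[:-1] = dropLast-slice)
def pvPeel (left right : List Char) : List String :=
  if left.length ≤ 1 then []
  else
    let left' := PySem.List.slice left (some 1) none
    let right' := PySem.List.slice right none (some (-1))
    [String.ofList left', String.ofList right'] ++ pvPeel left' right'
termination_by left.length
decreasing_by simp [PySem.List.slice_from_one]; omega

def makeParts_alt (x : Int) : List String :=
  let s := PySem.Int.toStr x
  [s] ++ pvPeel s.toList s.toList

-- ===== PRECONDITION & SPEC =====
def Spec_makeParts (x : Int) (out : List String) : Prop := out = makeParts_alt x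
instance (x : Int) (out : List String) : Decidable (Spec_makeParts x out) := by unfold Spec_makeParts; infer_instance

-- ===== CLAIM (what is proved, stated in full; the proofs are below) =====
def Claim_equal_makeParts : Prop := ∀ (x : Int), Dom_makeParts x → Spec_makeParts x (makeParts x)

-- ===== LEMMAS AND PROOFS =====

-- a string slice is ofList of the list slice
theorem strSlice_eq_ofList (s : String) (a? b? : Option Int) :
    PySem.Str.slice s a? b? = String.ofList (PySem.List.slice s.toList a? b?) := by
  have h := PySem.Str.toList_slice s a? b?
  rw [PySem.Chars.slice_eq_listSlice] at h
  rw [← h, String.ofList_toList]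

-- the peeling recursion, started after k steps, emits exactly A's remaining slice pairs
theorem pvPeel_eq (cs : List Char) (k : Nat) :
    pvPeel (cs.drop k) (cs.take (cs.length - k)) =
      (PySem.List.pyRange ((k : Int) + 1) (cs.length : Int) 1).flatMap
        (fun i => [String.ofList (PySem.List.slice cs (some i) none),
                   String.ofList (PySem.List.slice cs none (some (0 - i)))]) := by
  generalize hm : cs.length - k = m
  induction m generalizing k with
  | zero =>
    rw [pvPeel]
    rw [if_pos (by simp; omega)]
    rw [PySem.List.pyRange_one_eq_nil (by push_cast; omega)]
    simp
  | succ m ih =>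
    rw [pvPeel]
    by_cases h1 : m = 0
    · subst h1
      rw [if_pos (by simp; omega)]
      rw [PySem.List.pyRange_one_eq_nil (by push_cast; omega)]
      simp
    · rw [if_neg (by simp; omega)]
      rw [PySem.List.pyRange_one_cons (by omega)]
      simp only [PySem.List.slice_from_one, PySem.List.slice_to_neg_one,
        List.flatMap_cons]
      have hdrop : (cs.drop k).tail = cs.drop (k + 1) := by
        rw [List.tail_drop]
      have htake : (cs.take (m + 1)).dropLast = cs.take m := by
        rw [List.dropLast_eq_take, List.length_take, List.take_take]
        congr 1
        omega
      have hsl1 : PySem.List.slice cs (some ((k : Int) + 1)) none = cs.drop (k + 1) := by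
        have h := PySem.List.slice_from_natCast cs (k + 1)
        push_cast at h ⊢
        exact h
      have hsl2 : PySem.List.slice cs none (some (0 - ((k : Int) + 1)))
          = cs.take m := by
        have h := PySem.List.slice_to_neg_natCast cs (k + 1) (by omega)
        push_cast at h ⊢
        rw [show ((0:Int) - ((k:Int) + 1)) = -((k:Int)+1) by ring, h]
        congr 1
        omega
      rw [hdrop, htake, hsl1, hsl2]
      have ih' := ih (k + 1) (by omega)
      push_cast at ih' ⊢
      rw [ih']

-- ===== VERDICT (by name: the statement is the Claim_ definition above) =====
theorem makeParts_spec : Claim_equal_makeParts := by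
  intro x _
  unfold Spec_makeParts makeParts makeParts_alt
  rw [PySem.List.foldl_append_eq_flatMap]
  set s := PySem.Int.toStr x with hs
  have h0 := pvPeel_eq s.toList 0
  simp only [List.drop_zero, Nat.sub_zero, List.take_length] at h0
  rw [PySem.Str.len_eq]
  simp only [List.cons_append, List.nil_append]
  congr 1
  rw [h0]
  norm_num
  simp only [strSlice_eq_ofList]
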